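-- pv_equiv track=rewrite | github.com/nanihanny/Robotics-Final-Project-Fall-24 | Lidar_Data_Processing/search.py | dfs
-- ===== SOURCE A (Python) =====
-- def dfs(grid, x, y, visited, path_x, path_y):
--     # Check bounds and if cell is valid to visit
--     if x < 0 or y < 0 or x >= len(grid) or y >= len(grid[0]) or grid[x][y] in ['|', 'X'] or (x, y) in visited:
--         return False
--
--     # Add current cell to visited set and path
--     visited.add((x, y))
--     path_x.append(x)
--     path_y.append(y)
--
--     # If endpoint 'E' is found, return True
--     if grid[x][y] == 'E':
--         return True
--
--     # Define possible moves: up, down, left, right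
--     directions = [(0, 1), (1, 0), (0, -1), (-1, 0)]
--
--     for dx, dy in directions:
--         if dfs(grid, x + dx, y + dy, visited, path_x, path_y):
--             return True
--
--     # Backtrack: Remove the cell from the path if no solution is found in this branch
--     path_x.pop()
--     path_y.pop()
--     return False
-- ===== SOURCE B (Python) =====
-- def dfs(grid, x, y, visited, path_x, path_y):
--     # Iterative DFS with an explicit stack of (cell_x, cell_y, next_direction_index)
--     # frames that emulates the recursion's call stack exactly.
--     directions = ((0, 1), (1, 0), (0, -1), (-1, 0))
--
--     def valid(cx, cy):
--         return (0 <= cx < len(grid) and 0 <= cy < len(grid[0])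
--                 and grid[cx][cy] not in ('|', 'X') and (cx, cy) not in visited)
--
--     if not valid(x, y):
--         return False
--     visited.add((x, y))
--     path_x.append(x)
--     path_y.append(y)
--     if grid[x][y] == 'E':
--         return True
--
--     stack = [(x, y, 0)]
--     while stack:
--         cx, cy, i = stack[-1]
--         if i < 4:
--             stack[-1] = (cx, cy, i + 1)
--             dx, dy = directions[i]
--             nx, ny = cx + dx, cy + dy
--             if valid(nx, ny):
--                 visited.add((nx, ny))
--                 path_x.append(nx)
--                 path_y.append(ny)
--                 if grid[nx][ny] == 'E':
--                     return True
--                 stack.append((nx, ny, 0))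
--         else:
--             # all four directions exhausted: backtrack
--             stack.pop()
--             path_x.pop()
--             path_y.pop()
--     return False
-- ===== Notes on version B (the rewrite author's own statement) =====
-- stated objective: alternative
-- what changed: The recursive backtracking DFS is replaced by an iterative DFS driven by an explicit stack of (x, y, next-direction-index) frames that emulates the call stack, giving the same visit order, visited set, path mutations and boolean result without Python recursion.
-- outside the precondition, e.g. on dfs([['X'], []], 0, 0, set(), [], []): A returns False, B returns False
import Mathlib
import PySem

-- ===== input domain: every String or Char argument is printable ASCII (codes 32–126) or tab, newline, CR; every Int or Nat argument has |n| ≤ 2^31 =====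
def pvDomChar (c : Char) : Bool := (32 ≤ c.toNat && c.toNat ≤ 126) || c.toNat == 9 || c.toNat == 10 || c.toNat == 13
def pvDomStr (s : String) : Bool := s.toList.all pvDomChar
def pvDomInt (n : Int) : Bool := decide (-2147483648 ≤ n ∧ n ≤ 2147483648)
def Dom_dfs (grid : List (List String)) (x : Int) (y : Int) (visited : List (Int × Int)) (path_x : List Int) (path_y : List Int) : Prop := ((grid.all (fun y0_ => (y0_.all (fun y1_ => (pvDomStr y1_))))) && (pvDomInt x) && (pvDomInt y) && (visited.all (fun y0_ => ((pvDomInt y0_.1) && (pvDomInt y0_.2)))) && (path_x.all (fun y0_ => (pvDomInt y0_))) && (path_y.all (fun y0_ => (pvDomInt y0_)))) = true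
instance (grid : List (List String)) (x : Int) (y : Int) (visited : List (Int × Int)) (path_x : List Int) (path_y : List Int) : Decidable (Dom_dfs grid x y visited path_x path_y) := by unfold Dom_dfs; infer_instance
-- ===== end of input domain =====

-- B replaces A's recursive backtracking DFS by an iterative DFS over an explicit stack of
-- (x, y, next-direction-index) frames (objective: alternative decomposition, same cost).
-- A mutates visited/path_x/path_y in place; B performs the identical mutations — the
-- equivalence proved here is about the returned Bool.


-- shared state: (visited set, path_x, path_y)
abbrev PvSt := PySem.Set (Int × Int) × List Int × List Int

-- the common direction order (0,1),(1,0),(0,-1),(-1,0)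
def pvDirs : List (Int × Int) := [(0, 1), (1, 0), (0, -1), (-1, 0)]

-- grid[x][y], total form (exact whenever 0 ≤ x < len(grid) and 0 ≤ y < len(grid[x]))
def cellAt (grid : List (List String)) (x y : Int) : String :=
  (PySem.List.pyGet? ((PySem.List.pyGet? grid x).getD []) y).getD ""

-- ===== PORT A =====
-- A's one-line guard: bounds, wall '|'/'X', already visited
def pvGuard (grid : List (List String)) (x y : Int) (vis : PySem.Set (Int × Int)) : Bool :=
  decide (x < 0) || decide (y < 0) || decide ((grid.length : Int) ≤ x) ||
    decide (((grid.headD []).length : Int) ≤ y) ||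
    ["|", "X"].contains (cellAt grid x y) || vis.contains (x, y)

mutual
-- A's recursion; the fuel only makes it total (it never runs out: one unit per accepted
-- cell, and at most rows*cols cells can be accepted)
def dfsA (grid : List (List String)) (f : Nat) (x y : Int) (st : PvSt) :
    Option (Bool × PvSt) :=
  if pvGuard grid x y st.1 then some (false, st)
  else
    match f with
    | 0 => none
    | Nat.succ f' =>
      let st' : PvSt := (PySem.Set.add st.1 (x, y), st.2.1 ++ [x], st.2.2 ++ [y])
      if cellAt grid x y == "E" then some (true, st')
      else loopA grid f' x y pvDirs st'
termination_by (f, 0)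

-- A's 'for dx, dy in directions' loop; [] = loop fell through: backtrack (pop the path)
def loopA (grid : List (List String)) (f : Nat) (x y : Int) (ds : List (Int × Int))
    (st : PvSt) : Option (Bool × PvSt) :=
  match ds with
  | [] => some (false, (st.1, st.2.1.dropLast, st.2.2.dropLast))
  | d :: ds' =>
    match dfsA grid f (x + d.1) (y + d.2) st with
    | none => none
    | some (true, st1) => some (true, st1)
    | some (false, st1) => loopA grid f x y ds' st1
termination_by (f, ds.length + 1)
end

def dfs (grid : List (List String)) (x : Int) (y : Int) (visited : List (Int × Int))
    (path_x : List Int) (path_y : List Int) : Bool :=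
  match dfsA grid (grid.length * (grid.headD []).length + 1) x y (visited, path_x, path_y) with
  | some (b, _) => b
  | none => false

-- ===== PORT B =====
-- Source B's 'valid' helper
def pvValid (grid : List (List String)) (x y : Int) (vis : PySem.Set (Int × Int)) : Bool :=
  decide (0 ≤ x) && decide (x < (grid.length : Int)) && decide (0 ≤ y) &&
    decide (y < ((grid.headD []).length : Int)) &&
    !(["|", "X"].contains (cellAt grid x y)) && !(vis.contains (x, y))

-- Source B's while loop over the explicit stack of (cx, cy, next-direction-index) frames;
-- the fuel only makes it total (one unit per accepted push, at most rows*cols pushes)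
def loopB (grid : List (List String)) (f : Nat) (stack : List (Int × Int × Nat))
    (st : PvSt) : Option Bool :=
  match stack with
  | [] => some false
  | c :: rest =>
    if h : c.2.2 < 4 then
      if pvValid grid (c.1 + (pvDirs.getD c.2.2 (0, 0)).1)
          (c.2.1 + (pvDirs.getD c.2.2 (0, 0)).2) st.1 then
        match f with
        | 0 => none
        | Nat.succ f' =>
          if cellAt grid (c.1 + (pvDirs.getD c.2.2 (0, 0)).1)
              (c.2.1 + (pvDirs.getD c.2.2 (0, 0)).2) == "E" then some true
          else
            loopB grid f'
              ((c.1 + (pvDirs.getD c.2.2 (0, 0)).1, c.2.1 + (pvDirs.getD c.2.2 (0, 0)).2, 0) ::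
                (c.1, c.2.1, c.2.2 + 1) :: rest)
              (PySem.Set.add st.1
                  (c.1 + (pvDirs.getD c.2.2 (0, 0)).1, c.2.1 + (pvDirs.getD c.2.2 (0, 0)).2),
                st.2.1 ++ [c.1 + (pvDirs.getD c.2.2 (0, 0)).1],
                st.2.2 ++ [c.2.1 + (pvDirs.getD c.2.2 (0, 0)).2])
      else loopB grid f ((c.1, c.2.1, c.2.2 + 1) :: rest) st
    else loopB grid f rest (st.1, st.2.1.dropLast, st.2.2.dropLast)
termination_by (f, stack.length, 4 - (stack.headD (0, 0, 0)).2.2)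

def dfs_alt (grid : List (List String)) (x : Int) (y : Int) (visited : List (Int × Int))
    (path_x : List Int) (path_y : List Int) : Bool :=
  if !pvValid grid x y visited then false
  else
    let st1 : PvSt := (PySem.Set.add visited (x, y), path_x ++ [x], path_y ++ [y])
    if cellAt grid x y == "E" then true
    else (loopB grid (grid.length * (grid.headD []).length) [(x, y, 0)] st1).getD false

-- ===== PRECONDITION & SPEC =====
-- Pre_ excludes ragged grids (some row shorter than row 0) whose start cell is in bounds:
-- there A's grid[x][y] can raise IndexError when the search reaches a short row (B raises
-- the same way); on some such grids A happens to return False before touching a short row —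
-- both programs also return False there.
def Pre_dfs (grid : List (List String)) (x : Int) (y : Int) (visited : List (Int × Int)) (path_x : List Int) (path_y : List Int) : Prop :=
  (∀ row ∈ grid, (grid.headD []).length ≤ row.length) ∨
    x < 0 ∨ y < 0 ∨ (grid.length : Int) ≤ x ∨ ((grid.headD []).length : Int) ≤ y
instance (grid : List (List String)) (x : Int) (y : Int) (visited : List (Int × Int)) (path_x : List Int) (path_y : List Int) : Decidable (Pre_dfs grid x y visited path_x path_y) := by unfold Pre_dfs; infer_instance

def pvWitness_dfs : List (List String) × Int × Int × (List (Int × Int)) × List Int × List Int :=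
  ([[".", ".", "E"], [".", "|", "."]], 0, 0, [], [], [])

def Spec_dfs (grid : List (List String)) (x : Int) (y : Int) (visited : List (Int × Int)) (path_x : List Int) (path_y : List Int) (out : Bool) : Prop := out = dfs_alt grid x y visited path_x path_y
instance (grid : List (List String)) (x : Int) (y : Int) (visited : List (Int × Int)) (path_x : List Int) (path_y : List Int) (out : Bool) : Decidable (Spec_dfs grid x y visited path_x path_y out) := by unfold Spec_dfs; infer_instance

-- ===== CLAIM (what is proved, stated in full; the proofs are below) =====
def Claim_equal_dfs : Prop := ∀ (grid : List (List String)) (x : Int) (y : Int) (visited : List (Int × Int)) (path_x : List Int) (path_y : List Int), Dom_dfs grid x y visited path_x path_y → Pre_dfs grid x y visited path_x path_y → Spec_dfs grid x y visited path_x path_y (dfs grid x y visited path_x path_y)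

-- ===== LEMMAS AND PROOFS =====
-- (The two Lean ports are in fact equal on ALL inputs; Pre_ matters only for the
-- faithfulness of the ports to the Python programs, which raise on excluded inputs.)

-- the in-bounds cells of the grid
def pvCells (grid : List (List String)) : List (Int × Int) :=
  (List.range grid.length).flatMap
    (fun i => (List.range (grid.headD []).length).map (fun j => ((i : Int), (j : Int))))
def pvM (grid : List (List String)) (vis : PySem.Set (Int × Int)) : Nat :=
  (pvCells grid |>.filter (fun c => !vis.contains c)).length

lemma guard_eq_not_valid (grid : List (List String)) (x y : Int) (vis : PySem.Set (Int × Int)) :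
    pvGuard grid x y vis = !pvValid grid x y vis := by
  simp only [pvGuard, pvValid, Bool.not_and, Bool.not_not, ← decide_not, not_lt, not_le]
  simp [Bool.or_assoc, Bool.or_comm]

lemma mem_pvCells (grid : List (List String)) (a b : Int) :
    (a, b) ∈ pvCells grid ↔
      0 ≤ a ∧ a < (grid.length : Int) ∧ 0 ≤ b ∧ b < ((grid.headD []).length : Int) := by
  simp [pvCells]
  constructor
  · rintro ⟨⟨i, hi, rfl⟩, ⟨j, hj, rfl⟩⟩
    omega
  · rintro ⟨h1, h2, h3, h4⟩
    exact ⟨⟨a.toNat, by omega, by omega⟩, ⟨b.toNat, by omega, by omega⟩⟩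

lemma valid_cell (grid : List (List String)) (x y : Int) (vis : PySem.Set (Int × Int))
    (h : pvValid grid x y vis = true) :
    (x, y) ∈ pvCells grid ∧ vis.contains (x, y) = false := by
  simp only [pvValid, Bool.and_eq_true, decide_eq_true_eq, Bool.not_eq_true'] at h
  exact ⟨(mem_pvCells grid x y).mpr ⟨h.1.1.1.1.1, h.1.1.1.1.2, h.1.1.1.2, h.1.1.2⟩, h.2⟩

lemma length_filter_lt {α : Type} (l : List α) (p q : α → Bool) (h : ∀ a, p a = true → q a = true)
    (a : α) (ha : a ∈ l) (hq : q a = true) (hp : p a = false) :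
    (l.filter p).length < (l.filter q).length := by
  induction l with
  | nil => cases ha
  | cons b t ih =>
    rcases List.mem_cons.mp ha with rfl | hmem
    · simp only [List.filter_cons, hp, hq, if_true, if_false]
      exact Nat.lt_succ_of_le (List.Sublist.length_le (List.monotone_filter_right t h))
    · have hlt := ih hmem
      by_cases hb : p b = true
      · simp [List.filter_cons, hb, h b hb]; omega
      · simp only [List.filter_cons, Bool.not_eq_true] at hb ⊢
        rw [hb]
        cases hqb : q b <;> simp <;> omega

lemma contains_add_of (vis : PySem.Set (Int × Int)) (p c : Int × Int)
    (h : vis.contains c = true) : (PySem.Set.add vis p).contains c = true := by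
  rw [PySem.Set.contains_iff] at h ⊢
  exact (PySem.Set.mem_add vis p c).mpr (Or.inl h)

lemma contains_add_self (vis : PySem.Set (Int × Int)) (p : Int × Int) :
    (PySem.Set.add vis p).contains p = true := by
  rw [PySem.Set.contains_iff]
  exact (PySem.Set.mem_add vis p p).mpr (Or.inr rfl)

lemma pvM_add_le (grid : List (List String)) (vis : PySem.Set (Int × Int)) (p : Int × Int) :
    pvM grid (PySem.Set.add vis p) ≤ pvM grid vis := by
  apply List.Sublist.length_le
  apply List.monotone_filter_right
  intro c hc
  simp only [Bool.not_eq_true'] at hc ⊢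
  by_contra hvc
  simp only [Bool.not_eq_false] at hvc
  rw [contains_add_of vis p c hvc] at hc
  cases hc

lemma pvM_add_lt (grid : List (List String)) (vis : PySem.Set (Int × Int)) (x y : Int)
    (h : pvValid grid x y vis = true) :
    pvM grid (PySem.Set.add vis (x, y)) < pvM grid vis := by
  obtain ⟨hmem, hvc⟩ := valid_cell grid x y vis h
  apply length_filter_lt _ _ _ _ (x, y) hmem (by rw [Bool.not_eq_true']; exact hvc)
    (by rw [contains_add_self]; rfl)

  intro c hc
  simp only [Bool.not_eq_true'] at hc ⊢
  by_contra hvc2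
  simp only [Bool.not_eq_false] at hvc2
  rw [contains_add_of vis (x, y) c hvc2] at hc
  cases hc

lemma pvM_le_size (grid : List (List String)) (vis : PySem.Set (Int × Int)) :
    pvM grid vis ≤ grid.length * (grid.headD []).length := by
  have hlen : (pvCells grid).length = grid.length * (grid.headD []).length := by
    simp [pvCells, List.length_flatMap, Function.comp_def, List.map_const']
  exact hlen ▸ List.length_filter_le _ _

lemma loopA_mono_of (grid : List (List String)) (f : Nat)
    (hd : ∀ x y st b st', dfsA grid f x y st = some (b, st') → pvM grid st'.1 ≤ pvM grid st.1) :
    ∀ ds x y st b st', loopA grid f x y ds st = some (b, st') → pvM grid st'.1 ≤ pvM grid st.1 := by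
  intro ds
  induction ds with
  | nil =>
    intro x y st b st' hres
    rw [loopA] at hres
    simp only [Option.some.injEq, Prod.mk.injEq] at hres
    rw [← hres.2]
  | cons d ds ih =>
    intro x y st b st' hres
    rw [loopA] at hres
    cases hdf : dfsA grid f (x + d.1) (y + d.2) st with
    | none => rw [hdf] at hres; cases hres
    | some r =>
      obtain ⟨b1, st1⟩ := r
      rw [hdf] at hres
      cases b1 with
      | true =>
        simp only [Option.some.injEq, Prod.mk.injEq] at hres
        rw [← hres.2]
        exact hd _ _ _ _ _ hdf
      | false =>
        simp only at hres
        exact le_trans (ih _ _ _ _ _ hres) (hd _ _ _ _ _ hdf)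

lemma dfsA_mono (grid : List (List String)) :
    ∀ f x y st b st', dfsA grid f x y st = some (b, st') → pvM grid st'.1 ≤ pvM grid st.1 := by
  intro f
  induction f with
  | zero =>
    intro x y st b st' hres
    rw [dfsA] at hres
    by_cases hg : pvGuard grid x y st.1 = true
    · simp only [hg, if_true, Option.some.injEq, Prod.mk.injEq] at hres
      rw [← hres.2]
    · simp only [hg, if_false, Bool.false_eq_true] at hres
      cases hres
  | succ f' ih =>
    intro x y st b st' hres
    rw [dfsA] at hres
    by_cases hg : pvGuard grid x y st.1 = true
    · simp only [hg, if_true, Option.some.injEq, Prod.mk.injEq] at hres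
      rw [← hres.2]
    · by_cases hE : (cellAt grid x y == "E") = true
      · simp [hg, hE] at hres
        rw [← hres.2]
        exact pvM_add_le grid st.1 (x, y)
      · simp [hg, hE] at hres
        exact le_trans (loopA_mono_of grid f' ih _ _ _ _ _ _ hres)
          (pvM_add_le grid st.1 (x, y))

lemma loopA_some_of (grid : List (List String)) (f : Nat)
    (hd : ∀ x y st, pvM grid st.1 < f → (dfsA grid f x y st).isSome) :
    ∀ ds x y st, pvM grid st.1 < f → (loopA grid f x y ds st).isSome := by
  intro ds
  induction ds with
  | nil => intro x y st hm; rw [loopA]; rfl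
  | cons d ds ih =>
    intro x y st hm
    rw [loopA]
    cases hdf : dfsA grid f (x + d.1) (y + d.2) st with
    | none =>
      have := hd (x + d.1) (y + d.2) st hm
      rw [hdf] at this; cases this
    | some r =>
      obtain ⟨b1, st1⟩ := r
      cases b1 with
      | true => rfl
      | false =>
        have hle := dfsA_mono grid f _ _ _ _ _ hdf
        exact ih x y st1 (lt_of_le_of_lt hle hm)

lemma dfsA_some (grid : List (List String)) :
    ∀ f x y st, pvM grid st.1 < f → (dfsA grid f x y st).isSome := by
  intro f
  induction f with
  | zero => intro x y st hm; exact absurd hm (Nat.not_lt_zero _)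
  | succ f' ih =>
    intro x y st hm
    rw [dfsA]
    by_cases hg : pvGuard grid x y st.1 = true
    · simp [hg]
    · simp only [hg, if_false, Bool.false_eq_true]
      by_cases hE : (cellAt grid x y == "E") = true
      · simp [hE]
      · simp only [hE, if_false, Bool.false_eq_true]
        have hvalid : pvValid grid x y st.1 = true := by
          have := guard_eq_not_valid grid x y st.1
          rw [this] at hg
          simp at hg
          exact hg
        have hlt := pvM_add_lt grid st.1 x y hvalid
        exact loopA_some_of grid f' ih pvDirs x y _ (by simpa using lt_of_lt_of_le hlt (Nat.lt_succ_iff.mp hm))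

lemma loopA_some (grid : List (List String)) (f : Nat) :
    ∀ ds x y st, pvM grid st.1 < f → (loopA grid f x y ds st).isSome :=
  loopA_some_of grid f (dfsA_some grid f)

lemma loopA_stab_of (grid : List (List String)) (f : Nat)
    (hd : ∀ x y st r, dfsA grid f x y st = some r → dfsA grid (f + 1) x y st = some r) :
    ∀ ds x y st r, loopA grid f x y ds st = some r → loopA grid (f + 1) x y ds st = some r := by
  intro ds
  induction ds with
  | nil => intro x y st r hres; rw [loopA] at hres ⊢; exact hres
  | cons d ds ih =>
    intro x y st r hres
    rw [loopA] at hres ⊢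
    cases hdf : dfsA grid f (x + d.1) (y + d.2) st with
    | none => rw [hdf] at hres; cases hres
    | some r1 =>
      obtain ⟨b1, st1⟩ := r1
      rw [hdf] at hres
      rw [hd _ _ _ _ hdf]
      cases b1 with
      | true => exact hres
      | false => simp only at hres ⊢; exact ih _ _ _ _ hres

lemma dfsA_stab (grid : List (List String)) :
    ∀ f x y st r, dfsA grid f x y st = some r → dfsA grid (f + 1) x y st = some r := by
  intro f
  induction f with
  | zero =>
    intro x y st r hres
    rw [dfsA.eq_def] at hres ⊢
    by_cases hg : pvGuard grid x y st.1 = true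
    · simp [hg] at hres ⊢; exact hres
    · simp [hg] at hres
  | succ f' ih =>
    intro x y st r hres
    rw [dfsA.eq_def] at hres ⊢
    by_cases hg : pvGuard grid x y st.1 = true
    · simp [hg] at hres ⊢; exact hres
    · by_cases hE : (cellAt grid x y == "E") = true
      · simp [hg, hE] at hres ⊢; exact hres
      · simp only [hg, hE, if_false, Bool.false_eq_true] at hres ⊢
        exact loopA_stab_of grid f' ih _ _ _ _ _ hres

lemma dfsA_valid_eq (grid : List (List String)) (f : Nat) (x y : Int) (st : PvSt)
    (h : pvValid grid x y st.1 = true) (hm : pvM grid st.1 < f) :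
    dfsA grid f x y st =
      (if cellAt grid x y == "E"
        then some (true, (PySem.Set.add st.1 (x, y), st.2.1 ++ [x], st.2.2 ++ [y]))
        else loopA grid f x y pvDirs
          (PySem.Set.add st.1 (x, y), st.2.1 ++ [x], st.2.2 ++ [y])) := by
  have hg : pvGuard grid x y st.1 = false := by
    rw [guard_eq_not_valid, h]; rfl
  obtain ⟨f', rfl⟩ : ∃ f', f = f' + 1 := ⟨f - 1, by omega⟩
  rw [dfsA]
  simp only [hg, Bool.false_eq_true, if_false]
  by_cases hE : (cellAt grid x y == "E") = true
  · simp [hE]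
  · simp only [hE, if_false, Bool.false_eq_true]
    -- lift the inner loopA from fuel f' to fuel f' + 1
    have hlt := pvM_add_lt grid st.1 x y h
    have hsome := loopA_some grid f' pvDirs x y
      (PySem.Set.add st.1 (x, y), st.2.1 ++ [x], st.2.2 ++ [y]) (by simp; omega)
    obtain ⟨r, hr⟩ := Option.isSome_iff_exists.mp hsome
    rw [hr, loopA_stab_of grid f' (dfsA_stab grid f') _ _ _ _ _ hr]

def runK (grid : List (List String)) (f : Nat) :
    List (Int × Int × Nat) → PvSt → Option (Bool × PvSt)
  | [], st => some (false, st)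
  | c :: rest, st =>
    match loopA grid f c.1 c.2.1 (pvDirs.drop c.2.2) st with
    | none => none
    | some (true, st') => some (true, st')
    | some (false, st') => runK grid f rest st'

lemma drop_dirs (i : Nat) (h : i < 4) :
    pvDirs.drop i = pvDirs.getD i (0, 0) :: pvDirs.drop (i + 1) := by
  interval_cases i <;> rfl

lemma drop_dirs_nil (i : Nat) (h : ¬ i < 4) : pvDirs.drop i = [] :=
  List.drop_eq_nil_of_le (by simp [pvDirs]; omega)

lemma runK_pop (grid : List (List String)) (f : Nat) (x y : Int) (i : Nat) (hi : ¬ i < 4)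
    (rest : List (Int × Int × Nat)) (st : PvSt) :
    runK grid f ((x, y, i) :: rest) st =
      runK grid f rest (st.1, st.2.1.dropLast, st.2.2.dropLast) := by
  rw [runK, drop_dirs_nil i hi, loopA]

lemma runK_skip (grid : List (List String)) (f : Nat) (x y : Int) (i : Nat) (hi : i < 4)
    (rest : List (Int × Int × Nat)) (st : PvSt)
    (hv : pvValid grid (x + (pvDirs.getD i (0, 0)).1) (y + (pvDirs.getD i (0, 0)).2) st.1 = false) :
    runK grid f ((x, y, i) :: rest) st = runK grid f ((x, y, i + 1) :: rest) st := by
  have hg : pvGuard grid (x + (pvDirs.getD i (0, 0)).1) (y + (pvDirs.getD i (0, 0)).2) st.1 = true := by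
    rw [guard_eq_not_valid, hv]; rfl
  have hstep : loopA grid f x y (pvDirs.drop i) st = loopA grid f x y (pvDirs.drop (i + 1)) st := by
    rw [drop_dirs i hi, loopA, dfsA.eq_def, hg]
    simp
  rw [runK, runK, hstep]

lemma runK_push (grid : List (List String)) (f : Nat) (x y : Int) (i : Nat) (hi : i < 4)
    (rest : List (Int × Int × Nat)) (st : PvSt)
    (hv : pvValid grid (x + (pvDirs.getD i (0, 0)).1) (y + (pvDirs.getD i (0, 0)).2) st.1 = true)
    (hE : (cellAt grid (x + (pvDirs.getD i (0, 0)).1) (y + (pvDirs.getD i (0, 0)).2) == "E") = false)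
    (hm : pvM grid st.1 < f) :
    runK grid f ((x, y, i) :: rest) st =
      runK grid f
        ((x + (pvDirs.getD i (0, 0)).1, y + (pvDirs.getD i (0, 0)).2, 0) :: (x, y, i + 1) :: rest)
        (PySem.Set.add st.1 (x + (pvDirs.getD i (0, 0)).1, y + (pvDirs.getD i (0, 0)).2),
          st.2.1 ++ [x + (pvDirs.getD i (0, 0)).1], st.2.2 ++ [y + (pvDirs.getD i (0, 0)).2]) := by
  set nx := x + (pvDirs.getD i (0, 0)).1
  set ny := y + (pvDirs.getD i (0, 0)).2
  set st' : PvSt := (PySem.Set.add st.1 (nx, ny), st.2.1 ++ [nx], st.2.2 ++ [ny]) with hst'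
  have hd : dfsA grid f nx ny st = loopA grid f nx ny pvDirs st' := by
    rw [dfsA_valid_eq grid f nx ny st hv hm, hE]
    rfl
  rw [runK, runK, drop_dirs i hi, loopA, hd]
  cases hL : loopA grid f nx ny pvDirs st' with
  | none => simp only [List.drop_zero, hL]
  | some r =>
    obtain ⟨b, st1⟩ := r
    cases b with
    | true => simp only [List.drop_zero, hL]
    | false => simp only [List.drop_zero, hL, runK]

lemma pvM_pos (grid : List (List String)) (vis : PySem.Set (Int × Int)) (a b : Int)
    (h : pvValid grid a b vis = true) : 0 < pvM grid vis := by
  obtain ⟨hmem, hvc⟩ := valid_cell grid a b vis h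
  exact List.length_pos_of_mem
    (List.mem_filter.mpr ⟨hmem, by rw [Bool.not_eq_true']; exact hvc⟩)

lemma runK_E (grid : List (List String)) (f : Nat) (x y : Int) (i : Nat) (hi : i < 4)
    (rest : List (Int × Int × Nat)) (st : PvSt)
    (hv : pvValid grid (x + (pvDirs.getD i (0, 0)).1) (y + (pvDirs.getD i (0, 0)).2) st.1 = true)
    (hE : (cellAt grid (x + (pvDirs.getD i (0, 0)).1) (y + (pvDirs.getD i (0, 0)).2) == "E") = true)
    (hm : pvM grid st.1 < f) :
    runK grid f ((x, y, i) :: rest) st =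
      some (true, (PySem.Set.add st.1 (x + (pvDirs.getD i (0, 0)).1, y + (pvDirs.getD i (0, 0)).2),
        st.2.1 ++ [x + (pvDirs.getD i (0, 0)).1], st.2.2 ++ [y + (pvDirs.getD i (0, 0)).2])) := by
  have hd := dfsA_valid_eq grid f _ _ st hv hm
  rw [hE, if_pos rfl] at hd
  rw [runK, drop_dirs i hi, loopA, hd]

lemma sim (grid : List (List String)) :
    ∀ fB stack st, ∀ f : Nat, pvM grid st.1 ≤ fB → pvM grid st.1 < f →
      loopB grid fB stack st = (runK grid f stack st).map Prod.fst := by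
  intro fB stack st
  induction fB, stack, st using loopB.induct grid with
  | case1 fB st =>
    intro f _ _
    rw [loopB, runK]
    rfl
  | case2 st c rest hi hv =>
    intro f hfB hf
    obtain ⟨cx, cy, i⟩ := c
    dsimp only at hv
    have := pvM_pos grid st.1 _ _ hv
    omega
  | case3 st c rest hi hv f' hE =>
    intro f hfB hf
    obtain ⟨cx, cy, i⟩ := c
    dsimp only at hi hv hE
    rw [runK_E grid f cx cy i hi rest st hv hE hf]
    rw [loopB]
    simp only [dif_pos hi]
    rw [hv, if_pos rfl, if_pos hE]
    rfl
  | case4 st c rest hi hv f' hE ih =>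
    intro f hfB hf
    obtain ⟨cx, cy, i⟩ := c
    dsimp only at hi hv hE ih
    rw [Bool.not_eq_true] at hE
    have hlt : pvM grid (PySem.Set.add st.1
        (cx + (pvDirs.getD i (0, 0)).1, cy + (pvDirs.getD i (0, 0)).2)) < pvM grid st.1 :=
      pvM_add_lt grid st.1 _ _ hv
    rw [loopB]
    simp only [dif_pos hi]
    rw [hv, if_pos rfl, hE]
    simp only [Bool.false_eq_true, if_false]
    rw [ih f
      (show pvM grid (PySem.Set.add st.1
        (cx + (pvDirs.getD i (0, 0)).1, cy + (pvDirs.getD i (0, 0)).2)) ≤ f' by omega)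
      (show pvM grid (PySem.Set.add st.1
        (cx + (pvDirs.getD i (0, 0)).1, cy + (pvDirs.getD i (0, 0)).2)) < f by omega)]
    rw [← runK_push grid f cx cy i hi rest st hv hE hf]
  | case5 fB st c rest hi hv ih =>
    intro f hfB hf
    obtain ⟨cx, cy, i⟩ := c
    dsimp only at hi hv ih
    rw [Bool.not_eq_true] at hv
    rw [loopB.eq_def]
    dsimp only
    simp only [dif_pos hi]
    rw [hv]
    simp only [Bool.false_eq_true, if_false]
    rw [ih f hfB hf]
    rw [← runK_skip grid f cx cy i hi rest st hv]
  | case6 fB st c rest hi ih =>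
    intro f hfB hf
    obtain ⟨cx, cy, i⟩ := c
    dsimp only at hi ih
    rw [loopB.eq_def]
    dsimp only
    simp only [dif_neg hi]
    rw [ih f hfB hf]
    rw [← runK_pop grid f cx cy i hi rest st]

lemma ports_eq (grid : List (List String)) (x y : Int) (visited : List (Int × Int))
    (path_x path_y : List Int) :
    dfs grid x y visited path_x path_y = dfs_alt grid x y visited path_x path_y := by
  unfold dfs dfs_alt
  by_cases hv : pvValid grid x y visited = true
  · have hm : pvM grid visited ≤ grid.length * (grid.headD []).length :=
      pvM_le_size grid visited
    rw [dfsA_valid_eq grid (grid.length * (grid.headD []).length + 1) x y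
      (visited, path_x, path_y) hv
      (show pvM grid visited < grid.length * (grid.headD []).length + 1 by omega)]
    by_cases hE : (cellAt grid x y == "E") = true
    · rw [hE, if_pos rfl]
      simp [hv]
    · rw [Bool.not_eq_true] at hE
      rw [hE]
      simp only [Bool.false_eq_true, if_false]
      have hlt : pvM grid (PySem.Set.add visited (x, y)) < pvM grid visited :=
        pvM_add_lt grid visited x y hv
      have hsim := sim grid (grid.length * (grid.headD []).length) [(x, y, 0)]
        (PySem.Set.add visited (x, y), path_x ++ [x], path_y ++ [y])
        (grid.length * (grid.headD []).length + 1)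
        (show pvM grid (PySem.Set.add visited (x, y)) ≤
          grid.length * (grid.headD []).length by omega)
        (show pvM grid (PySem.Set.add visited (x, y)) <
          grid.length * (grid.headD []).length + 1 by omega)
      have hsome := loopA_some grid (grid.length * (grid.headD []).length + 1) pvDirs x y
        (PySem.Set.add visited (x, y), path_x ++ [x], path_y ++ [y])
        (show pvM grid (PySem.Set.add visited (x, y)) <
          grid.length * (grid.headD []).length + 1 by omega)
      obtain ⟨⟨b, st'⟩, hr⟩ := Option.isSome_iff_exists.mp hsome
      rw [runK, List.drop_zero, hr] at hsim
      rw [hr]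
      cases b with
      | true =>
        dsimp only at hsim
        simp only [List.headD_eq_head?_getD] at hsim
        simp [hv, hsim]
      | false =>
        dsimp only at hsim
        rw [runK] at hsim
        simp only [List.headD_eq_head?_getD] at hsim
        simp [hv, hsim]
  · have hg : pvGuard grid x y visited = true := by
      rw [guard_eq_not_valid]
      rw [Bool.not_eq_true] at hv
      rw [hv]
      rfl
    rw [dfsA.eq_def]
    simp [hg, hv]

-- ===== VERDICT (by name: the statement is the Claim_ definition above) =====
theorem dfs_spec : Claim_equal_dfs := by
  intro grid x y visited path_x path_y _ _
  show dfs grid x y visited path_x path_y = dfs_alt grid x y visited path_x path_y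
  exact ports_eq grid x y visited path_x path_y
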